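-- pv_equiv track=rewrite | github.com/olga3n/adventofcode | 2019/24-planet-of-discord-1.py | biodiversity_rating
-- ===== SOURCE A (Python) =====
-- def biodiversity_rating(state):
--     index = 0
--     rating = 0
--
--     for i in range(len(state)):
--         for j in range(len(state[i])):
--             if state[i][j] == '#':
--                 rating += (1 << index)
--             index += 1
--
--     return rating
-- ===== SOURCE B (Python) =====
-- def biodiversity_rating(state):
--     bits = ''.join('1' if c == '#' else '0' for row in state for c in row)
--     return int('0' + bits[::-1], 2)
-- ===== Notes on version B (the rewrite author's own statement) =====
-- stated objective: alternative
-- what changed: Replaces the explicit shift-and-accumulate loop over (index, rating) state with building a binary string (flatten grid, map '#'->'1', reverse) and parsing it in base 2.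
import Mathlib
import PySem

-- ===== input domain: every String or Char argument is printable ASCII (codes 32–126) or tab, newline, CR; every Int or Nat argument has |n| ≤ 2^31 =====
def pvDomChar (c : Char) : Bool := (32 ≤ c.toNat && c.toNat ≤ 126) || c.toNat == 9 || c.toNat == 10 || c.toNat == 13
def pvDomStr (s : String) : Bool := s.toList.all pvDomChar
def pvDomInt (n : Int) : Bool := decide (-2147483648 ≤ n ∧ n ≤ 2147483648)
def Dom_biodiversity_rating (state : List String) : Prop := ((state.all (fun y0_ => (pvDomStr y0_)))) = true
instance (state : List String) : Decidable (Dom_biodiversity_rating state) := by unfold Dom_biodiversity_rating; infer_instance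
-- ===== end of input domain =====

-- B replaces A's shift-and-accumulate loop by building a reversed binary string and parsing it base 2; alternative decomposition, same cost.

-- ===== PORT A =====
-- state threaded through the loops: (index, rating); 1 << index = 2^index (index is a count, kept as Nat)
def biodiversity_rating (state : List String) : Int :=
  (state.foldl (fun (p : Nat × Int) row =>
    row.toList.foldl (fun (q : Nat × Int) c =>
      (q.1 + 1, if c = '#' then q.2 + (2 : Int) ^ q.1 else q.2)) p) (0, 0)).2

-- ===== PORT B =====
-- bits = ''.join('1' if c == '#' else '0' for row in state for c in row)
-- int('0' + bits[::-1], 2): base-2 parse ported by hand (exact: the string is only '0'/'1' chars by construction)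
def biodiversity_rating_alt (state : List String) : Int :=
  let bits := (state.flatMap (fun row => row.toList)).map (fun c => if c = '#' then '1' else '0')
  ('0' :: bits.reverse).foldl (fun acc c => acc * 2 + (if c = '1' then 1 else 0)) 0

-- ===== PRECONDITION & SPEC =====
def Spec_biodiversity_rating (state : List String) (out : Int) : Prop := out = biodiversity_rating_alt state
instance (state : List String) (out : Int) : Decidable (Spec_biodiversity_rating state out) := by unfold Spec_biodiversity_rating; infer_instance

-- ===== CLAIM (what is proved, stated in full; the proofs are below) =====
def Claim_equal_biodiversity_rating : Prop := ∀ (state : List String), Dom_biodiversity_rating state → Spec_biodiversity_rating state (biodiversity_rating state)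

-- ===== LEMMAS AND PROOFS =====

-- value of a char list as a little-endian binary number
def pvVal (l : List Char) : Int :=
  l.foldr (fun c a => (if c = '#' then (1 : Int) else 0) + 2 * a) 0

theorem pvA_inner (l : List Char) : ∀ (i : Nat) (r : Int),
    (l.foldl (fun (q : Nat × Int) c =>
      (q.1 + 1, if c = '#' then q.2 + (2 : Int) ^ q.1 else q.2)) (i, r))
    = (i + l.length, r + (2 : Int) ^ i * pvVal l) := by
  induction l with
  | nil => intro i r; simp [pvVal]
  | cons c t ih =>
    intro i r
    simp only [List.foldl_cons, ih, pvVal, List.foldr_cons, List.length_cons]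
    rw [Prod.mk.injEq]
    refine ⟨by omega, ?_⟩
    split_ifs with h <;> ring

theorem pvA_flat (state : List String) :
    biodiversity_rating state = pvVal (state.flatMap (fun row => row.toList)) := by
  unfold biodiversity_rating
  rw [show (0, (0 : Int)) = ((0 : Nat), (0 : Int)) from rfl]
  have : ∀ (ss : List String) (i : Nat) (r : Int),
      (ss.foldl (fun (p : Nat × Int) row =>
        row.toList.foldl (fun (q : Nat × Int) c =>
          (q.1 + 1, if c = '#' then q.2 + (2 : Int) ^ q.1 else q.2)) p) (i, r)).2
      = r + (2 : Int) ^ i * pvVal (ss.flatMap (fun row => row.toList)) := by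
    intro ss
    induction ss with
    | nil => intro i r; simp [pvVal]
    | cons s t ih =>
      intro i r
      simp only [List.foldl_cons, pvA_inner, ih, List.flatMap_cons]
      have hcat : ∀ (a b : List Char), pvVal (a ++ b) = pvVal a + (2 : Int) ^ a.length * pvVal b := by
        intro a b
        induction a with
        | nil => simp [pvVal]
        | cons x u ihu => simp [pvVal, List.foldr_append] at *; rw [ihu]; ring
      rw [hcat]; ring
  rw [this]; simp

theorem pvB_val (state : List String) :
    biodiversity_rating_alt state = pvVal (state.flatMap (fun row => row.toList)) := by
  unfold biodiversity_rating_alt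
  set l := state.flatMap (fun row => row.toList) with hl
  simp only [List.foldl_cons]
  norm_num
  rw [show (if ('0' : Char) = '1' then (1 : Int) else 0) = 0 from rfl, List.foldr_map]
  have : ∀ m : List Char,
      m.foldr (fun c (a : Int) => a * 2 + (if (if c = '#' then '1' else '0') = '1' then 1 else 0)) 0
      = pvVal m := by
    intro m
    induction m with
    | nil => simp [pvVal]
    | cons c t ih =>
      simp only [List.foldr_cons, ih, pvVal]
      split_ifs <;> simp_all <;> ring
  rw [this]

-- ===== VERDICT (by name: the statement is the Claim_ definition above) =====
theorem biodiversity_rating_spec : Claim_equal_biodiversity_rating := by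
  intro state _
  unfold Spec_biodiversity_rating
  rw [pvA_flat, pvB_val]
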